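-- pv_equiv track=rewrite | github.com/tauri-st/gen-ai-recipe-chatbot | tests/test_recipe_visualization.py | _mock_split_recipes
-- ===== SOURCE A (Python) =====
-- def _mock_split_recipes(text):
--     """Mock implementation of recipe splitting logic from script.js."""
--     if not text or not isinstance(text, str):
--         return [text]
--
--     # Replace escaped newlines with actual newlines
--     text = text.replace("\\n", "\n")
--
--     # Split by Title: markers
--     title_matches = []
--     current_pos = 0
--     while True:
--         title_pos = text.find("Title:", current_pos)
--         if title_pos == -1:
--             break
--         title_matches.append(title_pos)
--         current_pos = title_pos + 6
--
--     if len(title_matches) > 1: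
--         recipes = []
--         for i, start in enumerate(title_matches):
--             end = title_matches[i+1] if i < len(title_matches) - 1 else len(text)
--             recipe = text[start:end].strip()
--             recipes.append(recipe)
--         return recipes
--
--     # If no multiple titles found, return the original text as a single recipe
--     return [text]
-- ===== SOURCE B (Python) =====
-- def _mock_split_recipes(text):
--     """Split text into recipes at 'Title:' markers (substring-based rewrite)."""
--     if not text or not isinstance(text, str):
--         return [text]
--
--     text = text.replace("\\n", "\n")
--
--     parts = text.split("Title:")
--     if len(parts) > 2:
--         return [("Title:" + p).strip() for p in parts[1:]]
--
--     return [text]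
-- ===== Notes on version B (the rewrite author's own statement) =====
-- stated objective: simpler
-- what changed: The explicit while-loop of text.find calls collecting integer title positions plus the enumerate loop slicing between consecutive positions is replaced by a single text.split("Title:") whose parts are re-prefixed with "Title:" and stripped; no position list or index arithmetic remains.
-- outside the precondition, e.g. on _mock_split_recipes(None): A returns [None], B returns [None]
import Mathlib
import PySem

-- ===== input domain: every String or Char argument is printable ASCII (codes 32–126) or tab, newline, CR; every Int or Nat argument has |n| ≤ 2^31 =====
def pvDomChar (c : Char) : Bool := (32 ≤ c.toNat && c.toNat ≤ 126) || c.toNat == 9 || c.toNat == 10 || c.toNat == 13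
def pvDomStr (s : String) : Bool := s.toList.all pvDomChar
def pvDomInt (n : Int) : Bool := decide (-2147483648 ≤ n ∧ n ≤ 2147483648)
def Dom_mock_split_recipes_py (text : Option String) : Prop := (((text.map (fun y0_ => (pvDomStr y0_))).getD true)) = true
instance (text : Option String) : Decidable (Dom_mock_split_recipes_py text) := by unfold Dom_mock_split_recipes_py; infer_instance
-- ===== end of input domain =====

-- B replaces A's explicit find-loop over integer positions (and the index arithmetic
-- over title_matches) by one str.split("Title:") and a reconstruction of each recipe
-- as "Title:" + part; objective: simpler.

-- ===== PORT A =====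
-- the while-loop collecting title positions; fuel = len(text)+1 bounds the loop
-- (each iteration advances current_pos by at least 6, so the fuel never runs out)
def pvFindLoopA (t : List Char) (cur : Int) : Nat → List Int
  | 0 => []
  | fuel+1 =>
    let p := PySem.Chars.findFrom t "Title:".toList cur
    if p = -1 then []
    else p :: pvFindLoopA t (p + 6) fuel

def mock_split_recipes_py (text : Option String) : List String :=
  match text with
  | none => []  -- Python returns [None] here: not a value of List String; excluded by Pre_
  | some s =>
    if s.toList.isEmpty then [s]
    else
      let t := PySem.Str.replace s "\\n" "\n"
      let ms := pvFindLoopA t.toList 0 (t.toList.length + 1)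
      if 1 < ms.length then
        (PySem.List.enumerate ms).foldl (fun recipes is =>
          let e : Int := if is.1 < (ms.length : Int) - 1
                         then PySem.List.pyGetD ms (is.1 + 1) 0
                         else (t.toList.length : Int)
          recipes ++ [String.ofList (PySem.Chars.strip
                        (PySem.Chars.slice t.toList (some is.2) (some e)))]) []
      else [t]

-- ===== PORT B =====
def mock_split_recipes_py_alt (text : Option String) : List String :=
  match text with
  | none => []  -- Python returns [None] here: not a value of List String; excluded by Pre_
  | some s =>
    if s.toList.isEmpty then [s]
    else
      let t := PySem.Str.replace s "\\n" "\n"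
      let parts := PySem.Chars.splitOn t.toList "Title:".toList
      if 2 < parts.length then
        parts.tail.map (fun p => String.ofList (PySem.Chars.strip ("Title:".toList ++ p)))
      else [t]

-- ===== PRECONDITION & SPEC =====
-- Pre_ excludes only text = None, on which A returns [None]: a list containing None is
-- not a value of the declared return type list[str] / List String.
def Pre_mock_split_recipes_py (text : Option String) : Prop := text.isSome = true
instance (text : Option String) : Decidable (Pre_mock_split_recipes_py text) := by
  unfold Pre_mock_split_recipes_py; infer_instance

def pvWitness_mock_split_recipes_py : Option String := some "Title: a\\nTitle: b"

def Spec_mock_split_recipes_py (text : Option String) (out : List String) : Prop := out = mock_split_recipes_py_alt text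
instance (text : Option String) (out : List String) : Decidable (Spec_mock_split_recipes_py text out) := by unfold Spec_mock_split_recipes_py; infer_instance

-- ===== CLAIM (what is proved, stated in full; the proofs are below) =====
def Claim_equal_mock_split_recipes_py : Prop := ∀ (text : Option String), Dom_mock_split_recipes_py text → Pre_mock_split_recipes_py text → Spec_mock_split_recipes_py text (mock_split_recipes_py text)

-- ===== LEMMAS AND PROOFS =====

-- the separator and basic facts about it
def pvSEP : List Char := "Title:".toList

theorem pvSEP_eq : "Title:".toList = pvSEP := rfl
theorem pvSEP_len : pvSEP.length = 6 := by decide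

-- occurrence positions of pvSEP in t, greedy left-to-right, as naturals
def pvOccs (t : List Char) : List Nat :=
  let p := PySem.Chars.find t pvSEP
  if p = -1 then []
  else p.toNat :: (pvOccs (t.drop (p.toNat + 6))).map (· + (p.toNat + 6))
termination_by t.length
decreasing_by
  rename_i h
  have h0 : (0:Int) ≤ PySem.Chars.find t pvSEP := by
    have := PySem.Chars.neg_one_le_find t pvSEP
    omega
  have hinf := (PySem.Chars.find_nonneg_iff t pvSEP).mp h0
  have hle : pvSEP.length ≤ t.length := hinf.length_le
  simp only [List.length_drop]
  have h6 : (6:Nat) ≤ t.length := by rw [pvSEP_len] at hle; exact hle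
  omega

-- if find succeeds at P then t.drop P starts with pvSEP and P+6 ≤ len t
theorem pv_drop_find (t : List Char) (h : 0 ≤ PySem.Chars.find t pvSEP) :
    t.drop (PySem.Chars.find t pvSEP).toNat
      = pvSEP ++ t.drop ((PySem.Chars.find t pvSEP).toNat + 6) ∧
    (PySem.Chars.find t pvSEP).toNat + 6 ≤ t.length := by
  obtain ⟨hpre, -⟩ := PySem.Chars.find_spec h
  obtain ⟨u, hu⟩ := hpre
  have hP : (PySem.Chars.find t pvSEP).toNat ≤ t.length := by
    have := PySem.Chars.find_le_length t pvSEP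
    omega
  have h1 : t.drop ((PySem.Chars.find t pvSEP).toNat + 6)
      = (t.drop (PySem.Chars.find t pvSEP).toNat).drop 6 := by
    rw [List.drop_drop, Nat.add_comm]
  have hu6 : (pvSEP ++ u).drop 6 = u := by
    have : pvSEP.length = 6 := pvSEP_len
    rw [← this, List.drop_left]
  constructor
  · rw [h1, ← hu, hu6, hu]
  · have := congrArg List.length hu
    simp only [List.length_append, pvSEP_len, List.length_drop] at this
    omega

-- pvFindLoopA computes the occurrence positions
theorem pv_findLoop_eq (fuel : Nat) :
    ∀ (t : List Char) (k : Nat), k ≤ t.length → t.length < k + fuel →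
    pvFindLoopA t (k : Int) fuel = (pvOccs (t.drop k)).map (fun m => ((m + k : Nat) : Int)) := by
  induction fuel with
  | zero => intro t k hk hlt; omega
  | succ fuel ih =>
    intro t k hk hlt
    rw [pvFindLoopA]
    simp only [pvSEP_eq]
    rw [PySem.Chars.findFrom_natCast t pvSEP k hk]
    by_cases hneg : PySem.Chars.find (t.drop k) pvSEP = -1
    · rw [pvOccs]
      simp [hneg]
    · have hg0 : 0 ≤ PySem.Chars.find (t.drop k) pvSEP := by
        have := PySem.Chars.neg_one_le_find (t.drop k) pvSEP
        omega
      obtain ⟨hdropeq, hlen6⟩ := pv_drop_find (t.drop k) hg0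
      set g := PySem.Chars.find (t.drop k) pvSEP with hgdef
      have hlen6' : g.toNat + 6 ≤ t.length - k := by
        simpa using hlen6
      have hkne : ¬ ((k : Int) + g = -1) := by omega
      rw [if_neg hneg, if_neg hkne]
      conv_rhs => rw [pvOccs]
      rw [if_neg hneg]
      have hdd : (t.drop k).drop (g.toNat + 6) = t.drop (k + (g.toNat + 6)) := by
        rw [List.drop_drop]
      have ihh := ih t (k + (g.toNat + 6)) (by omega) (by omega)
      have hcur : (k : Int) + g + 6 = ((k + (g.toNat + 6) : Nat) : Int) := by
        push_cast
        omega
      rw [hcur, ihh, hdd]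
      simp only [List.map_map, List.map_cons, ← hgdef]
      rw [List.cons.injEq]
      refine ⟨by push_cast; omega, ?_⟩
      apply List.map_congr_left
      intro m _
      simp only [Function.comp_apply]
      push_cast
      omega

-- shifting the start counter of find.go
theorem pv_go_shift (l : List Char) : ∀ k : Nat,
    PySem.Chars.find.go pvSEP l k =
      if PySem.Chars.find.go pvSEP l 0 = -1 then -1 else PySem.Chars.find.go pvSEP l 0 + (k : Int) := by
  induction l with
  | nil =>
    intro k
    simp [PySem.Chars.find.go, show pvSEP.isEmpty = false from by decide]
  | cons c rest ih =>
    intro k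
    rw [PySem.Chars.find.go, PySem.Chars.find.go]
    by_cases hp : pvSEP.isPrefixOf (c :: rest)
    · simp [hp]
    · simp only [hp, if_false, Bool.false_eq_true]
      have hg1 : PySem.Chars.find.go pvSEP rest 0 = PySem.Chars.find rest pvSEP := rfl
      have hge : (-1 : Int) ≤ PySem.Chars.find rest pvSEP := PySem.Chars.neg_one_le_find rest pvSEP
      rw [ih (k+1), ih 1]
      by_cases hm : PySem.Chars.find.go pvSEP rest 0 = -1
      · simp [hm]
      · rw [if_neg hm, if_neg (by rw [hg1] at hm ⊢; omega), if_neg hm]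
        push_cast
        ring

-- first-occurrence recursion for find
theorem pv_find_cons (c : Char) (rest : List Char) :
    PySem.Chars.find (c :: rest) pvSEP =
      if pvSEP.isPrefixOf (c :: rest) then 0
      else if PySem.Chars.find rest pvSEP = -1 then -1 else PySem.Chars.find rest pvSEP + 1 := by
  show PySem.Chars.find.go pvSEP (c :: rest) 0 = _
  rw [PySem.Chars.find.go]
  by_cases hp : pvSEP.isPrefixOf (c :: rest)
  · simp [hp]
  · simp only [hp, if_false, Bool.false_eq_true]
    rw [pv_go_shift rest 1]
    have hg1 : PySem.Chars.find.go pvSEP rest 0 = PySem.Chars.find rest pvSEP := rfl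
    rw [hg1]
    norm_num

-- the two components of splitOn without fuel/accumulators
def pvSpl : List Char → List Char × List (List Char)
  | [] => ([], [])
  | c :: rest =>
    if pvSEP.isPrefixOf (c :: rest) then
      ([], (pvSpl ((c :: rest).drop 6)).1 :: (pvSpl ((c :: rest).drop 6)).2)
    else ((c :: (pvSpl rest).1), (pvSpl rest).2)
termination_by t => t.length
decreasing_by
  · simp
  · simp

theorem pv_go_spec (n : Nat) :
    ∀ (l : List Char), l.length ≤ n → ∀ (fuel : Nat) (cur : List Char) (acc : List (List Char)),
    l.length < fuel →
    PySem.Chars.splitOn.go pvSEP fuel l cur acc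
      = acc.reverse ++ (cur.reverse ++ (pvSpl l).1) :: (pvSpl l).2 := by
  induction n with
  | zero =>
    intro l hl fuel cur acc hfuel
    have hl0 : l = [] := List.eq_nil_of_length_eq_zero (by omega)
    subst hl0
    cases fuel with
    | zero => simp at hfuel
    | succ fuel =>
      rw [PySem.Chars.splitOn.go] <;> simp [pvSpl]
  | succ n ih =>
    intro l hl fuel cur acc hfuel
    cases fuel with
    | zero => omega
    | succ fuel =>
      cases l with
      | nil =>
        rw [PySem.Chars.splitOn.go] <;> simp [pvSpl]
      | cons c rest =>
        rw [PySem.Chars.splitOn.go]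
        by_cases hp : pvSEP.isPrefixOf (c :: rest)
        · simp only [hp, if_true, pvSEP_len]
          have hlen : ((c :: rest).drop 6).length ≤ n := by
            simp only [List.length_drop, List.length_cons]
            simp only [List.length_cons] at hl
            omega
          rw [ih _ hlen fuel [] (cur.reverse :: acc)
                (by simp only [List.length_drop, List.length_cons]
                    simp only [List.length_cons] at hfuel
                    omega)]
          rw [pvSpl]
          simp [hp]
        · simp only [hp, if_false, Bool.false_eq_true]
          have hlen : rest.length ≤ n := by
            simp only [List.length_cons] at hl; omega
          rw [ih rest hlen fuel (c :: cur) acc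
                (by simp only [List.length_cons] at hfuel; omega)]
          rw [pvSpl]
          simp [hp]

theorem pv_splitOn_eq (t : List Char) :
    PySem.Chars.splitOn t pvSEP = (pvSpl t).1 :: (pvSpl t).2 := by
  show PySem.Chars.splitOn.go pvSEP (t.length + 1) t [] [] = _
  rw [pv_go_spec t.length t le_rfl (t.length + 1) [] [] (by omega)]
  simp

-- splitOn satisfies the find-based recursion
theorem pv_splitOn_find (t : List Char) :
    PySem.Chars.splitOn t pvSEP =
      if PySem.Chars.find t pvSEP = -1 then [t]
      else t.take (PySem.Chars.find t pvSEP).toNat ::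
           PySem.Chars.splitOn (t.drop ((PySem.Chars.find t pvSEP).toNat + 6)) pvSEP := by
  induction hn : t.length using Nat.strong_induction_on generalizing t with
  | _ n ihn =>
    match t with
    | [] =>
      have : PySem.Chars.find ([] : List Char) pvSEP = -1 := by decide
      rw [this]
      simp [pv_splitOn_eq, pvSpl]
    | c :: rest =>
      rw [pv_find_cons]
      by_cases hp : pvSEP.isPrefixOf (c :: rest)
      · simp only [hp, if_true]
        rw [pv_splitOn_eq, pvSpl]
        simp only [hp, if_true]
        rw [pv_splitOn_eq]
        norm_num
      · simp only [hp, if_false, Bool.false_eq_true]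
        have hge : (-1 : Int) ≤ PySem.Chars.find rest pvSEP := PySem.Chars.neg_one_le_find rest pvSEP
        have ihrest := ihn rest.length (by simp [← hn]) rest rfl
        by_cases hm : PySem.Chars.find rest pvSEP = -1
        · simp only [hm, if_true]
          rw [pv_splitOn_eq, pvSpl]
          simp only [hp, if_false, Bool.false_eq_true]
          rw [hm] at ihrest
          simp only [if_true] at ihrest
          rw [pv_splitOn_eq] at ihrest
          injection ihrest with h1 h2
          simp [h1, h2]
        · simp only [hm, if_false]
          have hg0 : 0 ≤ PySem.Chars.find rest pvSEP := by omega
          have htoNat : (PySem.Chars.find rest pvSEP + 1).toNat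
              = (PySem.Chars.find rest pvSEP).toNat + 1 := by omega
          have hne1 : ¬ (PySem.Chars.find rest pvSEP + 1 = -1) := by omega
          rw [if_neg hne1, htoNat]
          rw [pv_splitOn_eq, pvSpl]
          simp only [hp, if_false, Bool.false_eq_true]
          rw [if_neg hm] at ihrest
          rw [pv_splitOn_eq] at ihrest
          injection ihrest with h1 h2
          rw [h1, h2]
          simp only [List.take_succ_cons, List.drop_succ_cons]

theorem pv_splitOn_len (t : List Char) :
    (PySem.Chars.splitOn t pvSEP).length = (pvOccs t).length + 1 := by
  induction hn : t.length using Nat.strong_induction_on generalizing t with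
  | _ n ihn =>
    rw [pv_splitOn_find, pvOccs]
    by_cases hm : PySem.Chars.find t pvSEP = -1
    · simp [hm]
    · have hg0 : 0 ≤ PySem.Chars.find t pvSEP := by
        have := PySem.Chars.neg_one_le_find t pvSEP
        omega
      obtain ⟨-, hlen6⟩ := pv_drop_find t hg0
      simp only [hm, if_false]
      have := ihn (t.drop ((PySem.Chars.find t pvSEP).toNat + 6)).length
        (by simp only [List.length_drop, ← hn]; omega)
        (t.drop ((PySem.Chars.find t pvSEP).toNat + 6)) rfl
      simp [this]

-- the enumerate-fold over consecutive positions is a zip with the shifted list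
theorem pv_enum2zip {β : Type} (f : Int → Int → β) (ms : List Int) (L : Int) :
    (PySem.List.enumerate ms).map
        (fun is => f is.2 (if is.1 < (ms.length : Int) - 1 then PySem.List.pyGetD ms (is.1 + 1) 0 else L))
      = (ms.zip (ms.tail ++ [L])).map (fun ab => f ab.1 ab.2) := by
  apply List.ext_getElem
  · simp only [List.length_map, PySem.List.length_enumerate, List.length_zip, List.length_append,
      List.length_tail, List.length_cons]
    cases ms <;> simp
  · intro i h1 h2
    simp only [List.length_map, PySem.List.length_enumerate] at h1
    simp only [List.getElem_map, PySem.List.getElem_enumerate, List.getElem_zip]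
    have htl : (ms.tail ++ [L]).length = ms.length := by
      cases ms
      · simp at h1
      · simp
    by_cases hi : i < ms.length - 1
    · have hcond : (0 : Int) + (i : Int) < (ms.length : Int) - 1 := by omega
      rw [if_pos hcond]
      have hcast : (0 : Int) + (i : Int) + 1 = ((i + 1 : Nat) : Int) := by push_cast; omega
      rw [hcast, PySem.List.pyGetD_natCast]
      have hbound : i + 1 < ms.length := by omega
      rw [List.getD_eq_getElem ms 0 hbound]
      have : (ms.tail ++ [L])[i] = ms[i + 1] := by
        rw [List.getElem_append_left (by simp [List.length_tail]; omega)]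
        simp [List.getElem_tail]
      rw [this]
    · have hcond : ¬ ((0 : Int) + (i : Int) < (ms.length : Int) - 1) := by omega
      rw [if_neg hcond]
      have hieq : i = ms.length - 1 := by omega
      have : (ms.tail ++ [L])[i] = L := by
        rw [List.getElem_append_right (by simp [List.length_tail]; omega)]
        simp
      rw [this]

-- main correspondence: A's stripped slices = B's stripped sep-prefixed parts
theorem pv_main : ∀ (n : Nat) (t : List Char), t.length ≤ n → pvOccs t ≠ [] →
    ((pvOccs t).zip ((pvOccs t).tail ++ [t.length])).map
        (fun ab => PySem.Chars.strip ((t.drop ab.1).take (ab.2 - ab.1)))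
      = (PySem.Chars.splitOn t pvSEP).tail.map (fun p => PySem.Chars.strip (pvSEP ++ p)) := by
  intro n
  induction n using Nat.strong_induction_on with
  | _ n ihn =>
    intro t hn hne
    rw [pvOccs] at hne ⊢
    by_cases hm : PySem.Chars.find t pvSEP = -1
    · simp [hm] at hne
    · have hg0 : 0 ≤ PySem.Chars.find t pvSEP := by
        have := PySem.Chars.neg_one_le_find t pvSEP
        omega
      obtain ⟨hdropeq, hlen6⟩ := pv_drop_find t hg0
      simp only [hm, if_false]
      set P := (PySem.Chars.find t pvSEP).toNat with hP
      set r := t.drop (P + 6) with hr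
      have hrlen : r.length = t.length - (P + 6) := by simp [hr]
      rw [pv_splitOn_find t, if_neg hm]
      simp only [List.tail_cons]
      -- RHS is now (splitOn r).map …
      by_cases h2 : pvOccs r = []
      · -- exactly one occurrence
        have hfr : PySem.Chars.find r pvSEP = -1 := by
          by_contra hc
          rw [pvOccs] at h2
          simp [hc] at h2
        rw [pv_splitOn_find r, if_pos hfr]
        simp only [h2, List.map_nil, List.nil_append, List.zip_cons_cons,
          List.zip_nil_right, List.map_cons, List.map_nil]
        have htake : (t.drop P).take (t.length - P) = t.drop P := by
          apply List.take_of_length_le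
          simp
        rw [htake, hdropeq]
      · -- at least two occurrences
        obtain ⟨q, os, hqos⟩ := List.exists_cons_of_ne_nil h2
        have hq : q = (PySem.Chars.find r pvSEP).toNat ∧
            os = (pvOccs (r.drop ((PySem.Chars.find r pvSEP).toNat + 6))).map
              (· + ((PySem.Chars.find r pvSEP).toNat + 6)) := by
          rw [pvOccs] at hqos
          by_cases hfr : PySem.Chars.find r pvSEP = -1
          · simp [hfr] at hqos
          · simp only [hfr, if_false] at hqos
            exact ⟨(List.cons.injEq _ _ _ _ ▸ hqos).1.symm, (List.cons.injEq _ _ _ _ ▸ hqos).2.symm⟩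
        have hfr : ¬ PySem.Chars.find r pvSEP = -1 := by
          by_contra hc
          rw [pvOccs, if_pos hc] at hqos
          exact (List.cons_ne_nil q os) hqos.symm
        have hfr0 : 0 ≤ PySem.Chars.find r pvSEP := by
          have := PySem.Chars.neg_one_le_find r pvSEP
          omega
        -- unfold splitOn r once
        rw [pv_splitOn_find r, if_neg hfr]
        rw [hqos]
        simp only [List.cons_append, List.map_cons, List.zip_cons_cons]
        rw [List.cons.injEq]
        refine ⟨?_, ?_⟩
        · -- first recipe: strip (t.drop P |>.take (q + (P+6) - P)) = strip (pvSEP ++ r.take q')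
          have harith : q + (P + 6) - P = 6 + q := by omega
          rw [harith, hdropeq]
          have htk : (pvSEP ++ r).take (6 + q) = pvSEP ++ r.take q := by
            have h6 : (6:Nat) + q = pvSEP.length + q := by rw [pvSEP_len]
            rw [h6, List.take_append, List.take_of_length_le (by omega)]
            have h7 : pvSEP.length + q - pvSEP.length = q := by omega
            rw [h7]
          rw [htk, hq.1]
        · -- remaining recipes: shift into r and apply the induction hypothesis
          have hrsmall : r.length < n := by
            have : 0 < t.length := by omega
            omega
          have ihr := ihn r.length (by omega) r le_rfl (by rw [hqos]; exact List.cons_ne_nil q os)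
          rw [pvOccs, if_neg hfr] at ihr
          rw [pv_splitOn_find r, if_neg hfr] at ihr
          simp only [List.tail_cons] at ihr
          set q' := (PySem.Chars.find r pvSEP).toNat with hq'
          set os' := pvOccs (r.drop (q' + 6)) with hos'
          -- rewrite the zip as a mapped zip over r-relative positions
          have hzip : ((q + (P + 6)) :: os.map (· + (P + 6))).zip
                ((os.map (· + (P + 6))) ++ [t.length])
              = ((q' :: os'.map (· + (q' + 6))).zip (os'.map (· + (q' + 6)) ++ [r.length])).map
                  (fun ab => (ab.1 + (P + 6), ab.2 + (P + 6))) := by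
            have h1 : (q + (P + 6)) :: os.map (· + (P + 6))
                = (q' :: os'.map (· + (q' + 6))).map (· + (P + 6)) := by
              simp only [List.map_cons, List.map_map]
              refine congrArg₂ _ (by rw [hq.1]) ?_
              rw [hq.2]
              simp
            have h2 : (os.map (· + (P + 6))) ++ [t.length]
                = (os'.map (· + (q' + 6)) ++ [r.length]).map (· + (P + 6)) := by
              simp only [List.map_append, List.map_map]
              refine congrArg₂ _ ?_ ?_
              · rw [hq.2]
                simp
              · simp [hrlen]
                omega
            rw [h1, h2, List.zip_map]
            rfl
          rw [hzip, List.map_map]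
          rw [← ihr]
          apply List.map_congr_left
          intro ab _
          simp only [Function.comp_apply]
          have hdrop : t.drop (ab.1 + (P + 6)) = r.drop ab.1 := by
            rw [hr, List.drop_drop, Nat.add_comm]
          rw [hdrop]
          have harith2 : ab.2 + (P + 6) - (ab.1 + (P + 6)) = ab.2 - ab.1 := by omega
          rw [harith2]

-- the two ports agree on every present string
theorem pv_core (s : String) : mock_split_recipes_py (some s) = mock_split_recipes_py_alt (some s) := by
  rw [mock_split_recipes_py, mock_split_recipes_py_alt]
  by_cases hs : s.toList.isEmpty
  · simp [hs]
  · simp only [hs, if_false, Bool.false_eq_true, pvSEP_eq]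
    set t := PySem.Str.replace s "\\n" "\n" with ht
    have hms : pvFindLoopA t.toList 0 (t.toList.length + 1)
        = (pvOccs t.toList).map (fun m => ((m : Nat) : Int)) := by
      have := pv_findLoop_eq (t.toList.length + 1) t.toList 0 (by omega) (by omega)
      simpa using this
    have hlenp := pv_splitOn_len t.toList
    rw [hms]
    set ms := (pvOccs t.toList).map (fun m => ((m : Nat) : Int)) with hmsdef
    have hmslen : ms.length = (pvOccs t.toList).length := by rw [hmsdef]; simp
    by_cases hN : 1 < (pvOccs t.toList).length
    · rw [if_pos (by rw [hmslen]; exact hN), if_pos (by rw [hlenp]; omega)]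
      have hone : pvOccs t.toList ≠ [] := by
        intro hc; rw [hc] at hN; simp at hN
      -- turn the fold into a map over enumerate
      rw [PySem.List.foldl_append_singleton_eq_map
        (fun is : Int × Int => String.ofList (PySem.Chars.strip (PySem.Chars.slice t.toList (some is.2)
          (some (if is.1 < (ms.length : Int) - 1
                 then PySem.List.pyGetD ms (is.1 + 1) 0
                 else (t.toList.length : Int))))))]
      rw [List.nil_append]
      rw [pv_enum2zip (fun a b => String.ofList (PySem.Chars.strip
            (PySem.Chars.slice t.toList (some a) (some b)))) ms ((t.toList.length : Int))]
      -- convert the Int zip into the Nat zip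
      have htail : ms.tail ++ [(t.toList.length : Int)]
          = ((pvOccs t.toList).tail ++ [t.toList.length]).map (fun m => ((m : Nat) : Int)) := by
        rw [hmsdef]
        simp [List.map_tail]
      rw [htail, hmsdef, List.zip_map, List.map_map]
      have hmain := pv_main t.toList.length t.toList le_rfl hone
      calc ((pvOccs t.toList).zip ((pvOccs t.toList).tail ++ [t.toList.length])).map
              ((fun ab => String.ofList (PySem.Chars.strip
                (PySem.Chars.slice t.toList (some ab.1) (some ab.2)))) ∘
               Prod.map (fun m => ((m : Nat) : Int)) (fun m => ((m : Nat) : Int)))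
          = ((pvOccs t.toList).zip ((pvOccs t.toList).tail ++ [t.toList.length])).map
              (fun ab => String.ofList (PySem.Chars.strip ((t.toList.drop ab.1).take (ab.2 - ab.1)))) := by
            apply List.map_congr_left
            intro ab _
            simp only [Function.comp_apply, Prod.map_fst, Prod.map_snd,
              PySem.Chars.slice_eq_listSlice]
            rw [PySem.List.slice_natCast]
        _ = ((PySem.Chars.splitOn t.toList pvSEP).tail.map
              (fun p => PySem.Chars.strip (pvSEP ++ p))).map String.ofList := by
            rw [← hmain, List.map_map]
            rfl
        _ = (PySem.Chars.splitOn t.toList pvSEP).tail.map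
              (fun p => String.ofList (PySem.Chars.strip (pvSEP ++ p))) := by
            rw [List.map_map]
            rfl
    · rw [if_neg (by rw [hmslen]; exact hN), if_neg (by rw [hlenp]; omega)]

-- ===== VERDICT (by name: the statement is the Claim_ definition above) =====
theorem mock_split_recipes_py_spec : Claim_equal_mock_split_recipes_py := by
  intro text hdom hpre
  unfold Spec_mock_split_recipes_py
  match text with
  | none => simp [Pre_mock_split_recipes_py] at hpre
  | some s => exact pv_core s
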